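-- pv_equiv track=rewrite | github.com/aritraChakraborty101/CSE221_Assginments | Assignment4/task6.py | find_max_diamonds
-- ===== SOURCE A (Python) =====
-- def dfs(grid, r, c, visited):
--     # Check if the current cell is out of bounds or is a wall or is already visited
--     # if either of these conditions is true, then return 0
--     # 0 means that no diamonds are collected
--     if r < 0 or c < 0 or r >= len(grid) or c >= len(grid[0]) or grid[r][c] == '#' or visited[r][c]:
--         return 0
--
--     visited[r][c] = True
--     diamonds = 0
--
--     if grid[r][c] == 'D':
--         diamonds = 1
--
--     # Recursively call dfs on the neighbors of the current cell
--     diamonds += dfs(grid, r - 1, c, visited)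
--     diamonds += dfs(grid, r + 1, c, visited)
--     diamonds += dfs(grid, r, c - 1, visited)
--     diamonds += dfs(grid, r, c + 1, visited)
--
--     return diamonds
--
-- def find_max_diamonds(grid):
--     rows = len(grid)
--     cols = len(grid[0])
--     max_diamonds = 0
--
--     for r in range(rows):
--         for c in range(cols):
--             if grid[r][c] == '.':  # If the current cell is empty
--                 visited = []
--                 # Create a visited matrix and initialize it with False
--                 # This means that no cell is visited yet
--                 for _ in range(rows):
--                     visited.append([False] * cols)
--                 diamonds_collected = dfs(grid, r, c, visited)
--                 if diamonds_collected > max_diamonds: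
--                     max_diamonds = diamonds_collected
--
--     return max_diamonds
-- ===== SOURCE B (Python) =====
-- def find_max_diamonds(grid):
--     rows = len(grid)
--     cols = len(grid[0])
--     seen = [[False] * cols for _ in range(rows)]
--     best = 0
--     for r in range(rows):
--         for c in range(cols):
--             if grid[r][c] == '#' or seen[r][c]:
--                 continue
--             # flood this whole component once, iteratively
--             seen[r][c] = True
--             stack = [(r, c)]
--             diamonds = 0
--             empties = 0
--             while stack:
--                 i, j = stack.pop()
--                 ch = grid[i][j]
--                 if ch == 'D':
--                     diamonds += 1
--                 elif ch == '.':
--                     empties += 1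
--                 for ni, nj in ((i - 1, j), (i + 1, j), (i, j - 1), (i, j + 1)):
--                     if 0 <= ni < rows and 0 <= nj < cols and grid[ni][nj] != '#' and not seen[ni][nj]:
--                         seen[ni][nj] = True
--                         stack.append((ni, nj))
--             if empties > 0 and diamonds > best:
--                 best = diamonds
--     return best
-- ===== Notes on version B (the rewrite author's own statement) =====
-- stated objective: alternative
-- what changed: A restarts a fresh recursive DFS with a brand-new visited matrix from every '.' cell, so a connected region is re-explored once per empty cell in it; B sweeps the grid once, flood-filling each non-wall component a single time with an explicit stack and one shared seen matrix, counting its diamonds and empty cells, and takes the max diamond count over components that contain an empty cell.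
import Mathlib
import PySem

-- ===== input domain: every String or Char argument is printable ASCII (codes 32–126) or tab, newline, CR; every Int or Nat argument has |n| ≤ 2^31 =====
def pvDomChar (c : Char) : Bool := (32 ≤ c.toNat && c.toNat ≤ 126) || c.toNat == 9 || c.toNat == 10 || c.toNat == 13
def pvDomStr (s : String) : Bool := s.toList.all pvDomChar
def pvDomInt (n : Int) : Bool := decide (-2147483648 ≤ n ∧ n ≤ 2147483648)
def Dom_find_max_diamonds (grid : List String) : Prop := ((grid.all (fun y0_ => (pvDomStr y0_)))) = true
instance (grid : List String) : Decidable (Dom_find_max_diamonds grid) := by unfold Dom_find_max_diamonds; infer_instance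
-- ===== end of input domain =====

-- B replaces A's fresh recursive DFS per '.'-cell by one sweep that flood-fills every
-- non-wall component once (explicit stack, one shared seen matrix) and maximises the
-- diamond count over components containing a '.'-cell; return value only is compared.

-- ===== PORT A =====

-- grid[r][c] : the guards of the Python precede every access, so the defaults are never
-- observed on inputs satisfying Pre_ (exact there)
def pvCell (g : List (List Char)) (r c : Int) : Char :=
  (g.getD r.toNat []).getD c.toNat '#'

-- visited[r][c]
def pvGet2 (vis : List (List Bool)) (r c : Int) : Bool :=
  (vis.getD r.toNat []).getD c.toNat false

-- visited[r][c] = b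
def pvSet2 (vis : List (List Bool)) (r c : Int) (b : Bool) : List (List Bool) :=
  vis.set r.toNat ((vis.getD r.toNat []).set c.toNat b)

-- the recursive dfs of A; fuel (rows*cols+1 at the call site) only makes the recursion
-- structural: every recursive level below a passed guard marks a fresh cell, so it is
-- never exhausted
def dfsA (g : List (List Char)) (r c : Int) (vis : List (List Bool)) :
    Nat → Int × List (List Bool)
  | 0 => (0, vis)
  | fuel+1 =>
    if r < 0 ∨ c < 0 ∨ (g.length : Int) ≤ r ∨ ((g.headD []).length : Int) ≤ c
        ∨ pvCell g r c = '#' ∨ pvGet2 vis r c then (0, vis)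
    else
      let vis1 := pvSet2 vis r c true
      let d0 : Int := if pvCell g r c = 'D' then 1 else 0
      let r1 := dfsA g (r-1) c vis1 fuel
      let r2 := dfsA g (r+1) c r1.2 fuel
      let r3 := dfsA g r (c-1) r2.2 fuel
      let r4 := dfsA g r (c+1) r3.2 fuel
      (d0 + r1.1 + r2.1 + r3.1 + r4.1, r4.2)

def find_max_diamonds (grid : List String) : Int :=
  let g := grid.map String.toList
  let rows := g.length
  let cols := (g.headD []).length
  (List.range rows).foldl (fun best (r : Nat) =>
    (List.range cols).foldl (fun best (c : Nat) =>
      if pvCell g r c = '.' then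
        -- visited built row by row, as in the Python
        let visited := (List.range rows).foldl
          (fun acc _ => acc ++ [List.replicate cols false]) []
        let d := (dfsA g r c visited (rows * cols + 1)).1
        if best < d then d else best
      else best) best) 0

-- ===== PORT B =====

-- the while-stack loop of B; stack top = list head (Python appends/pops at the end,
-- in the same order); fuel rows*cols+1 is never exhausted (each iteration pops one
-- entry and marks every cell it pushes)
def floodB (g : List (List Char)) :
    List (Int × Int) → List (List Bool) → Int → Int → Nat → Int × Int × List (List Bool)
  | _, vis, dia, emp, 0 => (dia, emp, vis)
  | [], vis, dia, emp, _+1 => (dia, emp, vis)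
  | p :: stack, vis, dia, emp, fuel+1 =>
      let ch := pvCell g p.1 p.2
      let dia := if ch = 'D' then dia + 1 else dia
      let emp := if ch = 'D' then emp else if ch = '.' then emp + 1 else emp
      let sv := [(p.1-1, p.2), (p.1+1, p.2), (p.1, p.2-1), (p.1, p.2+1)].foldl
        (fun (sv : List (Int × Int) × List (List Bool)) nb =>
          if 0 ≤ nb.1 ∧ nb.1 < (g.length : Int) ∧ 0 ≤ nb.2 ∧ nb.2 < ((g.headD []).length : Int)
              ∧ pvCell g nb.1 nb.2 ≠ '#' ∧ ¬ pvGet2 sv.2 nb.1 nb.2 = true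
          then (nb :: sv.1, pvSet2 sv.2 nb.1 nb.2 true) else sv) (stack, vis)
      floodB g sv.1 sv.2 dia emp fuel

def find_max_diamonds_alt (grid : List String) : Int :=
  let g := grid.map String.toList
  let rows := g.length
  let cols := (g.headD []).length
  let init := List.replicate rows (List.replicate cols false)
  let res := (List.range rows).foldl (fun (st : List (List Bool) × Int) (r : Nat) =>
    (List.range cols).foldl (fun (st : List (List Bool) × Int) (c : Nat) =>
      if pvCell g r c = '#' ∨ pvGet2 st.1 r c = true then st
      else
        let seen := pvSet2 st.1 r c true
        let f := floodB g [((r : Int), (c : Int))] seen 0 0 (rows * cols + 1)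
        if 0 < f.2.1 ∧ st.2 < f.1 then (f.2.2, f.1) else (f.2.2, st.2)) st) (init, 0)
  res.2

-- ===== PRECONDITION & SPEC =====
-- Pre_ excludes exactly the inputs on which the Python A raises IndexError: the empty
-- grid (len(grid[0])) and grids with some row shorter than the first row (the outer
-- scan indexes every row at columns 0..len(grid[0])-1).
def Pre_find_max_diamonds (grid : List String) : Prop :=
  grid ≠ [] ∧ ∀ s ∈ grid, (grid.headD "").length ≤ s.length
instance (grid : List String) : Decidable (Pre_find_max_diamonds grid) := by
  unfold Pre_find_max_diamonds; infer_instance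

def pvWitness_find_max_diamonds : List String := ["D.", "#D"]

def Spec_find_max_diamonds (grid : List String) (out : Int) : Prop := out = find_max_diamonds_alt grid
instance (grid : List String) (out : Int) : Decidable (Spec_find_max_diamonds grid out) := by
  unfold Spec_find_max_diamonds; infer_instance

-- ===== CLAIM (what is proved, stated in full; the proofs are below) =====
def Claim_equal_find_max_diamonds : Prop := ∀ (grid : List String), Dom_find_max_diamonds grid → Pre_find_max_diamonds grid → Spec_find_max_diamonds grid (find_max_diamonds grid)

-- ===== LEMMAS AND PROOFS =====

-- ---- abstract grid vocabulary ----

def gR (g : List (List Char)) : Nat := g.length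
def gC (g : List (List Char)) : Nat := (g.headD []).length

def okP (g : List (List Char)) (p : Int × Int) : Prop :=
  0 ≤ p.1 ∧ p.1 < (gR g : Int) ∧ 0 ≤ p.2 ∧ p.2 < (gC g : Int) ∧ pvCell g p.1 p.2 ≠ '#'

def allCells (g : List (List Char)) : Finset (Int × Int) :=
  (Finset.range (gR g) ×ˢ Finset.range (gC g)).image (fun ab => ((ab.1 : Int), (ab.2 : Int)))

def Adjc (g : List (List Char)) (p q : Int × Int) : Prop :=
  okP g p ∧ okP g q ∧
    (q = (p.1-1, p.2) ∨ q = (p.1+1, p.2) ∨ q = (p.1, p.2-1) ∨ q = (p.1, p.2+1))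

def Stepc (g : List (List Char)) (V : Finset (Int × Int)) (p q : Int × Int) : Prop :=
  Adjc g p q ∧ q ∉ V

def Conn (g : List (List Char)) (V : Finset (Int × Int)) (p q : Int × Int) : Prop :=
  Relation.ReflTransGen (Stepc g V) p q

-- classical filter (proof-side only)
noncomputable def cfilter {α : Type} (p : α → Prop) (s : Finset α) : Finset α :=
  @Finset.filter α p (fun q => Classical.propDecidable _) s

noncomputable def compC (g : List (List Char)) (V : Finset (Int × Int)) (p : Int × Int) :
    Finset (Int × Int) :=
  cfilter (fun q => okP g p ∧ Conn g V p q) (allCells g)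

noncomputable def compD (g : List (List Char)) (V : Finset (Int × Int)) (p : Int × Int) :
    Finset (Int × Int) :=
  @ite _ (okP g p ∧ p ∉ V) (Classical.propDecidable _) (compC g V p) ∅

noncomputable def dnum (g : List (List Char)) (S : Finset (Int × Int)) : Int :=
  ((cfilter (fun q => pvCell g q.1 q.2 = 'D') S).card : Int)

noncomputable def enum (g : List (List Char)) (S : Finset (Int × Int)) : Int :=
  ((cfilter (fun q => pvCell g q.1 q.2 = '.') S).card : Int)

noncomputable def dvalN (g : List (List Char)) (q : Int × Int) : Nat :=
  (cfilter (fun q' => pvCell g q'.1 q'.2 = 'D') (compC g ∅ q)).card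

-- matrix/Finset correspondence
def MRel (g : List (List Char)) (vis : List (List Bool)) (V : Finset (Int × Int)) : Prop :=
  vis.length = gR g ∧ (∀ i, i < gR g → (vis.getD i []).length = gC g) ∧
    V ⊆ allCells g ∧ ∀ p ∈ allCells g, (pvGet2 vis p.1 p.2 = true ↔ p ∈ V)

def OkClosed (g : List (List Char)) (V : Finset (Int × Int)) : Prop :=
  ∀ a ∈ V, okP g a ∧ ∀ b, Adjc g a b → b ∈ V

-- ---- basic lemmas ----

theorem mem_cfilter {α : Type} {p : α → Prop} {s : Finset α} {a : α} :
    a ∈ cfilter p s ↔ a ∈ s ∧ p a := by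
  unfold cfilter; exact @Finset.mem_filter _ _ (fun q => Classical.propDecidable _) _ _

theorem mem_allCells {g : List (List Char)} {p : Int × Int} :
    p ∈ allCells g ↔ 0 ≤ p.1 ∧ p.1 < (gR g : Int) ∧ 0 ≤ p.2 ∧ p.2 < (gC g : Int) := by
  constructor
  · intro h
    simp only [allCells, Finset.mem_image, Finset.mem_product, Finset.mem_range] at h
    obtain ⟨⟨a, b⟩, ⟨ha, hb⟩, rfl⟩ := h
    refine ⟨?_, ?_, ?_, ?_⟩ <;> simp <;> omega
  · rintro ⟨h1, h2, h3, h4⟩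
    simp only [allCells, Finset.mem_image, Finset.mem_product, Finset.mem_range]
    refine ⟨(p.1.toNat, p.2.toNat), ⟨?_, ?_⟩, ?_⟩
    · omega
    · omega
    · simp only [Prod.ext_iff]; constructor <;> simp <;> omega

theorem card_allCells (g : List (List Char)) : (allCells g).card = gR g * gC g := by
  unfold allCells
  rw [Finset.card_image_of_injective, Finset.card_product, Finset.card_range, Finset.card_range]
  intro a b h
  simp only [Prod.ext_iff] at h
  exact Prod.ext (by exact_mod_cast h.1) (by exact_mod_cast h.2)

theorem okP_mem_allCells {g : List (List Char)} {p : Int × Int} (h : okP g p) :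
    p ∈ allCells g := mem_allCells.2 ⟨h.1, h.2.1, h.2.2.1, h.2.2.2.1⟩

theorem Adjc_symm {g : List (List Char)} {p q : Int × Int} (h : Adjc g p q) : Adjc g q p := by
  obtain ⟨hp, hq, hc⟩ := h
  refine ⟨hq, hp, ?_⟩
  obtain ⟨p1, p2⟩ := p; obtain ⟨q1, q2⟩ := q
  simp only [Prod.ext_iff] at hc ⊢
  omega

theorem conn_ok {g : List (List Char)} {V : Finset (Int × Int)} {p q : Int × Int}
    (hp : okP g p) (h : Conn g V p q) : okP g q := by
  induction h with
  | refl => exact hp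
  | tail _ st ih => exact st.1.2.1

theorem conn_mono {g : List (List Char)} {V W : Finset (Int × Int)} (hVW : V ⊆ W)
    {p q : Int × Int} (h : Conn g W p q) : Conn g V p q := by
  induction h with
  | refl => exact Relation.ReflTransGen.refl
  | tail _ st ih => exact ih.tail ⟨st.1, fun hm => st.2 (hVW hm)⟩

theorem mem_compC {g : List (List Char)} {V : Finset (Int × Int)} {p q : Int × Int} :
    q ∈ compC g V p ↔ okP g p ∧ Conn g V p q := by
  rw [compC, mem_cfilter]
  constructor
  · exact fun h => h.2
  · intro h
    exact ⟨okP_mem_allCells (conn_ok h.1 h.2), h⟩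

theorem self_mem_compC {g : List (List Char)} {V : Finset (Int × Int)} {p : Int × Int}
    (h : okP g p) : p ∈ compC g V p := mem_compC.2 ⟨h, Relation.ReflTransGen.refl⟩

theorem conn_last_not_mem {g : List (List Char)} {V : Finset (Int × Int)} {p q : Int × Int}
    (h : Conn g V p q) : q = p ∨ q ∉ V := by
  rcases Relation.ReflTransGen.cases_tail h with h1 | ⟨c, _, hc⟩
  · exact Or.inl h1
  · exact Or.inr hc.2

-- the one core graph lemma: erasing a set N of vertices from the avoid-set of a path
theorem connW {g : List (List Char)} {V N : Finset (Int × Int)} {s q : Int × Int}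
    (h : Conn g V s q) :
    (∃ y ∈ N, Conn g (V ∪ N) y q) ∨ Conn g (V ∪ N) s q := by
  induction h with
  | refl => exact Or.inr Relation.ReflTransGen.refl
  | @tail b c _ st ih =>
    by_cases hcN : c ∈ N
    · exact Or.inl ⟨c, hcN, Relation.ReflTransGen.refl⟩
    · have hst : Stepc g (V ∪ N) b c := ⟨st.1, by simp [st.2, hcN]⟩
      rcases ih with ⟨y, hy, hc⟩ | hc
      · exact Or.inl ⟨y, hy, hc.tail hst⟩
      · exact Or.inr (hc.tail hst)

-- a chain that starts inside a component and must avoid the whole component is trivial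
theorem conn_absorb {g : List (List Char)} {V : Finset (Int × Int)} {x y q : Int × Int}
    (hy : y ∈ compC g V x) (h : Conn g (V ∪ compC g V x) y q) : q = y := by
  rcases Relation.ReflTransGen.cases_head h with h1 | ⟨c, hc, _⟩
  · exact h1.symm
  · exfalso
    have hyc : Conn g V y c := Relation.ReflTransGen.single ⟨hc.1, fun hm => hc.2 (by simp [hm])⟩
    have hx := mem_compC.1 hy
    have : c ∈ compC g V x := mem_compC.2 ⟨hx.1, hx.2.trans hyc⟩
    exact hc.2 (by simp [this])

theorem compC_closed_empty {g : List (List Char)} {p a b : Int × Int}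
    (ha : a ∈ compC g ∅ p) (hab : Adjc g a b) : b ∈ compC g ∅ p := by
  have ha' := mem_compC.1 ha
  exact mem_compC.2 ⟨ha'.1, ha'.2.tail ⟨hab, by simp⟩⟩

theorem conn_symm_empty {g : List (List Char)} {p q : Int × Int} (h : Conn g ∅ p q) :
    Conn g ∅ q p := by
  induction h with
  | refl => exact Relation.ReflTransGen.refl
  | tail _ st ih => exact Relation.ReflTransGen.head ⟨Adjc_symm st.1, by simp⟩ ih

theorem class_eq {g : List (List Char)} {p q : Int × Int} (h : q ∈ compC g ∅ p) :
    compC g ∅ q = compC g ∅ p := by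
  have h' := mem_compC.1 h
  ext q'
  rw [mem_compC, mem_compC]
  constructor
  · rintro ⟨_, hc⟩
    exact ⟨h'.1, h'.2.trans hc⟩
  · rintro ⟨_, hc⟩
    exact ⟨conn_ok h'.1 h'.2, (conn_symm_empty h'.2).trans hc⟩

theorem closed_irrel {g : List (List Char)} {V : Finset (Int × Int)} (hV : OkClosed g V)
    {p : Int × Int} (hp : p ∉ V) {q : Int × Int} (h : Conn g ∅ p q) : Conn g V p q := by
  have h2 : q ∉ V ∧ Conn g V p q := by
    induction h with
    | refl => exact ⟨hp, Relation.ReflTransGen.refl⟩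
    | @tail b c hab st ih =>
      have hc : c ∉ V := fun hcv => ih.1 ((hV c hcv).2 b (Adjc_symm st.1))
      exact ⟨hc, ih.2.tail ⟨st.1, hc⟩⟩
  exact h2.2

theorem compC_insert_self {g : List (List Char)} {V : Finset (Int × Int)} {p : Int × Int} :
    compC g (insert p V) p = compC g V p := by
  ext q
  rw [mem_compC, mem_compC]
  constructor
  · rintro ⟨hok, hc⟩
    exact ⟨hok, conn_mono (Finset.subset_insert _ _) hc⟩
  · rintro ⟨hok, hc⟩
    refine ⟨hok, ?_⟩
    have hup : V ∪ ({p} : Finset (Int × Int)) = insert p V := by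
      rw [Finset.insert_eq, Finset.union_comm]
    rcases connW (N := {p}) hc with ⟨y, hy, hc'⟩ | hc'
    · rw [Finset.mem_singleton] at hy
      rw [hup] at hc'
      exact hy ▸ hc'
    · rw [hup] at hc'
      exact hc'

-- ---- sequential decomposition (for A's four recursive calls) ----

noncomputable def compFold (g : List (List Char)) :
    Finset (Int × Int) → List (Int × Int) → Finset (Int × Int)
  | _, [] => ∅
  | V, x :: xs => compD g V x ∪ compFold g (V ∪ compD g V x) xs

theorem mem_compD {g : List (List Char)} {V : Finset (Int × Int)} {p q : Int × Int} :
    q ∈ compD g V p ↔ (okP g p ∧ p ∉ V) ∧ Conn g V p q := by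
  unfold compD
  by_cases h : okP g p ∧ p ∉ V
  · rw [if_pos h, mem_compC]
    tauto
  · rw [if_neg h]
    simp [h]

theorem compD_not_mem {g : List (List Char)} {V : Finset (Int × Int)} {p q : Int × Int}
    (h : q ∈ compD g V p) : q ∉ V := by
  obtain ⟨⟨hok, hnv⟩, hc⟩ := mem_compD.1 h
  rcases conn_last_not_mem hc with h1 | h1
  · exact h1 ▸ hnv
  · exact h1

theorem mem_compFold {g : List (List Char)} {V : Finset (Int × Int)} {xs : List (Int × Int)}
    {q : Int × Int} :
    q ∈ compFold g V xs ↔ ∃ x ∈ xs, (okP g x ∧ x ∉ V) ∧ Conn g V x q := by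
  induction xs generalizing V with
  | nil => simp [compFold]
  | cons x xs ih =>
    rw [compFold]
    constructor
    · intro h
      rcases Finset.mem_union.1 h with h | h
      · exact ⟨x, List.mem_cons_self, mem_compD.1 h⟩
      · obtain ⟨x', hx', ⟨⟨hok, hnv⟩, hc⟩⟩ := ih.1 h
        refine ⟨x', List.mem_cons_of_mem _ hx', ⟨⟨hok, fun hm => hnv (Finset.mem_union_left _ hm)⟩, ?_⟩⟩
        exact conn_mono Finset.subset_union_left hc
    · rintro ⟨x', hx', ⟨⟨hok, hnv⟩, hc⟩⟩
      rcases List.mem_cons.1 hx' with rfl | hx'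
      · exact Finset.mem_union_left _ (mem_compD.2 ⟨⟨hok, hnv⟩, hc⟩)
      · -- erase the first component from the avoid set of the chain
        by_cases hKcond : okP g x ∧ x ∉ V
        · have hK : compD g V x = compC g V x := by rw [compD, if_pos hKcond]
          rcases connW (N := compD g V x) hc with ⟨y, hy, hc'⟩ | hc'
          · -- chain from inside the component: trivial, q lands in the component
            rw [hK] at hy hc'
            have hq : q = y := conn_absorb hy hc'
            exact Finset.mem_union_left _ (by rw [hK]; exact hq ▸ hy)
          · by_cases hx'K : x' ∈ compD g V x
            · -- x' inside the component: q reachable from x, lands in the component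
              rw [hK] at hx'K
              have hx'c := mem_compC.1 hx'K
              exact Finset.mem_union_left _ (by
                rw [hK]; exact mem_compC.2 ⟨hx'c.1, hx'c.2.trans hc⟩)
            · exact Finset.mem_union_right _ (ih.2 ⟨x', hx',
                ⟨⟨hok, by simp [hnv, hx'K]⟩, hc'⟩⟩)
        · have hK : compD g V x = ∅ := by rw [compD, if_neg hKcond]
          rw [hK]
          simp only [Finset.union_empty]
          exact Finset.mem_union_right _ (ih.2 ⟨x', hx', ⟨⟨hok, by simp [hnv]⟩, by simpa [hK] using hc⟩⟩)

def nbrs (p : Int × Int) : List (Int × Int) :=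
  [(p.1-1, p.2), (p.1+1, p.2), (p.1, p.2-1), (p.1, p.2+1)]

theorem adj_mem_nbrs {g : List (List Char)} {p q : Int × Int} (h : Adjc g p q) :
    q ∈ nbrs p := by
  obtain ⟨_, _, hc⟩ := h
  simp only [nbrs, List.mem_cons]
  tauto

theorem nbrs_adj {g : List (List Char)} {p q : Int × Int} (hp : okP g p) (hq : okP g q)
    (h : q ∈ nbrs p) : Adjc g p q := by
  refine ⟨hp, hq, ?_⟩
  simp only [nbrs, List.mem_cons] at h
  tauto

theorem comp_decomp {g : List (List Char)} {V : Finset (Int × Int)} {p : Int × Int}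
    (hok : okP g p) (hnv : p ∉ V) :
    compC g V p = insert p (compFold g (insert p V) (nbrs p)) := by
  ext q
  rw [mem_compC, Finset.mem_insert, mem_compFold]
  constructor
  · rintro ⟨_, hc⟩
    have hup : V ∪ ({p} : Finset (Int × Int)) = insert p V := by
      rw [Finset.insert_eq, Finset.union_comm]
    have hc1 : Conn g (insert p V) p q := by
      rcases connW (N := {p}) hc with ⟨y, hy, hc'⟩ | hc'
      · rw [Finset.mem_singleton] at hy
        rw [hup] at hc'
        exact hy ▸ hc'
      · rw [hup] at hc'
        exact hc'
    rcases Relation.ReflTransGen.cases_head hc1 with h1 | ⟨b, hb, hc2⟩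
    · exact Or.inl h1.symm
    · refine Or.inr ⟨b, adj_mem_nbrs hb.1, ⟨⟨hb.1.2.1, hb.2⟩, hc2⟩⟩
  · rintro (rfl | ⟨b, hbn, ⟨⟨hbok, hbnv⟩, hc⟩⟩)
    · exact ⟨hok, Relation.ReflTransGen.refl⟩
    · refine ⟨hok, Relation.ReflTransGen.head ?_ (conn_mono (Finset.subset_insert _ _) hc)⟩
      exact ⟨nbrs_adj hok hbok hbn, fun hm => hbnv (Finset.mem_insert_of_mem hm)⟩

-- ---- matrix / Finset bridge ----

theorem getD_set {α : Type} (l : List α) (i j : Nat) (a d : α) :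
    (l.set i a).getD j d = if i = j ∧ i < l.length then a else l.getD j d := by
  rw [List.getD_eq_getElem?_getD, List.getD_eq_getElem?_getD, List.getElem?_set]
  by_cases h1 : i = j
  · by_cases h2 : i < l.length
    · rw [if_pos h1, if_pos h2, if_pos ⟨h1, h2⟩]
      rfl
    · rw [if_pos h1, if_neg h2, if_neg (by tauto)]
      subst h1
      rw [List.getElem?_eq_none (by omega)]
  · rw [if_neg h1, if_neg (by tauto)]

theorem pvGet2_pvSet2 (g : List (List Char)) (vis : List (List Bool)) (p q : Int × Int)
    (b : Bool) (hlen : vis.length = gR g) (hrow : ∀ i, i < gR g → (vis.getD i []).length = gC g)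
    (hp : p ∈ allCells g) (hq : q ∈ allCells g) :
    pvGet2 (pvSet2 vis p.1 p.2 b) q.1 q.2 = if q = p then b else pvGet2 vis q.1 q.2 := by
  obtain ⟨hp1, hp2, hp3, hp4⟩ := mem_allCells.1 hp
  obtain ⟨hq1, hq2, hq3, hq4⟩ := mem_allCells.1 hq
  unfold pvGet2 pvSet2
  rw [getD_set]
  by_cases hrr : p.1.toNat = q.1.toNat
  · have hr : p.1 = q.1 := by omega
    rw [if_pos ⟨hrr, by omega⟩, hrr, getD_set]
    have hlr : (vis.getD q.1.toNat []).length = gC g := hrow _ (by omega)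
    by_cases hcc : p.2.toNat = q.2.toNat
    · have hc : p.2 = q.2 := by omega
      rw [if_pos ⟨hcc, by omega⟩, if_pos (by exact Prod.ext hr.symm hc.symm)]
    · rw [if_neg (by intro h; exact hcc h.1), if_neg (by
        intro h; exact hcc (by rw [h]))]
  · rw [if_neg (by intro h; exact hrr h.1), if_neg (by
      intro h; exact hrr (by rw [h]))]

theorem pvSet2_length (vis : List (List Bool)) (r c : Int) (b : Bool) :
    (pvSet2 vis r c b).length = vis.length := List.length_set

theorem pvSet2_rowlen (vis : List (List Bool)) (r c : Int) (b : Bool) (i : Nat) :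
    ((pvSet2 vis r c b).getD i []).length = (vis.getD i []).length := by
  unfold pvSet2
  rw [getD_set]
  split_ifs with h
  · rw [List.length_set, h.1]
  · rfl

theorem MRel_set2 {g : List (List Char)} {vis : List (List Bool)} {V : Finset (Int × Int)}
    (h : MRel g vis V) {p : Int × Int} (hp : p ∈ allCells g) :
    MRel g (pvSet2 vis p.1 p.2 true) (insert p V) := by
  obtain ⟨h1, h2, h3, h4⟩ := h
  refine ⟨by rw [pvSet2_length, h1], fun i hi => by rw [pvSet2_rowlen]; exact h2 i hi,
    Finset.insert_subset hp h3, fun q hq => ?_⟩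
  rw [pvGet2_pvSet2 g vis p q true h1 h2 hp hq, Finset.mem_insert]
  split_ifs with he
  · simp [he]
  · rw [h4 q hq]
    simp [he]

theorem MRel_fresh (g : List (List Char)) :
    MRel g (List.replicate (gR g) (List.replicate (gC g) false)) ∅ := by
  refine ⟨List.length_replicate, fun i hi => ?_, Finset.empty_subset _, fun p hp => ?_⟩
  · rw [List.getD_eq_getElem?_getD, List.getElem?_replicate, if_pos hi]
    exact List.length_replicate
  · obtain ⟨h1, h2, h3, h4⟩ := mem_allCells.1 hp
    unfold pvGet2
    have e1 : (List.replicate (gR g) (List.replicate (gC g) false)).getD p.1.toNat []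
        = List.replicate (gC g) false := by
      rw [List.getD_eq_getElem?_getD, List.getElem?_replicate, if_pos (by omega)]
      rfl
    rw [e1, List.getD_eq_getElem?_getD, List.getElem?_replicate, if_pos (by omega)]
    simp

-- the guard of dfsA, read through MRel
theorem guardA {g : List (List Char)} {vis : List (List Bool)} {V : Finset (Int × Int)}
    (h : MRel g vis V) (r c : Int) :
    (r < 0 ∨ c < 0 ∨ (g.length : Int) ≤ r ∨ ((g.headD []).length : Int) ≤ c
      ∨ pvCell g r c = '#' ∨ pvGet2 vis r c = true) ↔ ¬(okP g (r, c) ∧ (r, c) ∉ V) := by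
  constructor
  · rintro (h1 | h1 | h1 | h1 | h1 | h1) ⟨hok, hnv⟩
    · exact absurd hok.1 (by simpa using h1)
    · exact absurd hok.2.2.1 (by simpa using h1)
    · exact absurd hok.2.1 (by rw [gR]; omega)
    · exact absurd hok.2.2.2.1 (by rw [gC]; omega)
    · exact hok.2.2.2.2 h1
    · have hmem : (r, c) ∈ allCells g := okP_mem_allCells hok
      exact hnv ((h.2.2.2 _ hmem).1 h1)
  · intro hng
    by_cases h1 : r < 0; · exact Or.inl h1
    by_cases h2 : c < 0; · exact Or.inr (Or.inl h2)
    by_cases h3 : (g.length : Int) ≤ r; · exact Or.inr (Or.inr (Or.inl h3))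
    by_cases h4 : ((g.headD []).length : Int) ≤ c
    · exact Or.inr (Or.inr (Or.inr (Or.inl h4)))
    by_cases h5 : pvCell g r c = '#'
    · exact Or.inr (Or.inr (Or.inr (Or.inr (Or.inl h5))))
    have hok : okP g (r, c) := ⟨by omega, by rw [gR] at *; omega, by omega, by rw [gC] at *; omega, h5⟩
    have hv : (r, c) ∈ V := by
      by_contra hnv
      exact hng ⟨hok, hnv⟩
    refine Or.inr (Or.inr (Or.inr (Or.inr (Or.inr ?_))))
    exact (h.2.2.2 _ (okP_mem_allCells hok)).2 hv

-- ---- counting ----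

theorem dnum_empty (g : List (List Char)) : dnum g ∅ = 0 := by
  simp [dnum, cfilter]

theorem enum_empty (g : List (List Char)) : enum g ∅ = 0 := by
  simp [enum, cfilter]

theorem cfilter_union {α : Type} [DecidableEq α] {p : α → Prop} {S T : Finset α} :
    cfilter p (S ∪ T) = cfilter p S ∪ cfilter p T := by
  ext a
  simp only [mem_cfilter, Finset.mem_union]
  tauto

theorem cfilter_disjoint {α : Type} [DecidableEq α] {p : α → Prop} {S T : Finset α} (h : Disjoint S T) :
    Disjoint (cfilter p S) (cfilter p T) := by
  rw [Finset.disjoint_left]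
  intro a ha hb
  exact (Finset.disjoint_left.1 h) (mem_cfilter.1 ha).1 (mem_cfilter.1 hb).1

theorem dnum_union {g : List (List Char)} {S T : Finset (Int × Int)} (h : Disjoint S T) :
    dnum g (S ∪ T) = dnum g S + dnum g T := by
  unfold dnum
  rw [cfilter_union, Finset.card_union_of_disjoint (cfilter_disjoint h)]
  push_cast
  ring

theorem enum_union {g : List (List Char)} {S T : Finset (Int × Int)} (h : Disjoint S T) :
    enum g (S ∪ T) = enum g S + enum g T := by
  unfold enum
  rw [cfilter_union, Finset.card_union_of_disjoint (cfilter_disjoint h)]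
  push_cast
  ring

theorem cfilter_singleton_pos {α : Type} {p : α → Prop} {a : α} (h : p a) :
    cfilter p ({a} : Finset α) = {a} := by
  ext x
  simp only [mem_cfilter, Finset.mem_singleton]
  constructor
  · exact fun hx => hx.1
  · rintro rfl
    exact ⟨rfl, h⟩

theorem cfilter_singleton_neg {α : Type} {p : α → Prop} {a : α} (h : ¬ p a) :
    cfilter p ({a} : Finset α) = ∅ := by
  ext x
  simp only [mem_cfilter, Finset.mem_singleton, Finset.notMem_empty, iff_false]
  rintro ⟨rfl, hx⟩
  exact h hx

theorem dnum_insert {g : List (List Char)} {S : Finset (Int × Int)} {p : Int × Int}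
    (h : p ∉ S) :
    dnum g (insert p S) = (if pvCell g p.1 p.2 = 'D' then 1 else 0) + dnum g S := by
  have he : insert p S = {p} ∪ S := Finset.insert_eq p S
  rw [he, dnum_union (by simpa using h)]
  congr 1
  unfold dnum
  split_ifs with hD
  · rw [cfilter_singleton_pos (p := fun q : Int × Int => pvCell g q.1 q.2 = 'D') hD]
    simp
  · rw [cfilter_singleton_neg (p := fun q : Int × Int => pvCell g q.1 q.2 = 'D') hD]
    simp

theorem enum_insert {g : List (List Char)} {S : Finset (Int × Int)} {p : Int × Int}
    (h : p ∉ S) :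
    enum g (insert p S) = (if pvCell g p.1 p.2 = '.' then 1 else 0) + enum g S := by
  have he : insert p S = {p} ∪ S := Finset.insert_eq p S
  rw [he, enum_union (by simpa using h)]
  congr 1
  unfold enum
  split_ifs with hD
  · rw [cfilter_singleton_pos (p := fun q : Int × Int => pvCell g q.1 q.2 = '.') hD]
    simp
  · rw [cfilter_singleton_neg (p := fun q : Int × Int => pvCell g q.1 q.2 = '.') hD]
    simp

theorem card_sdiff_insert_lt {g : List (List Char)} {V : Finset (Int × Int)} {p : Int × Int}
    (hp : p ∈ allCells g) (hnv : p ∉ V) :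
    ((allCells g) \ insert p V).card < ((allCells g) \ V).card := by
  apply Finset.card_lt_card
  constructor
  · intro x hx
    rw [Finset.mem_sdiff] at hx ⊢
    exact ⟨hx.1, fun hm => hx.2 (Finset.mem_insert_of_mem hm)⟩
  · intro hsub
    have : p ∈ (allCells g) \ insert p V := hsub (Finset.mem_sdiff.2 ⟨hp, hnv⟩)
    rw [Finset.mem_sdiff] at this
    exact this.2 (Finset.mem_insert_self _ _)

theorem card_sdiff_mono_sub {g : List (List Char)} {V W : Finset (Int × Int)} (h : V ⊆ W) :
    ((allCells g) \ W).card ≤ ((allCells g) \ V).card :=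
  Finset.card_le_card (fun x hx => by
    rw [Finset.mem_sdiff] at hx ⊢
    exact ⟨hx.1, fun hm => hx.2 (h hm)⟩)

-- ---- the characterization of A's dfs ----

theorem main_A (g : List (List Char)) :
    ∀ (fuel : Nat) (V : Finset (Int × Int)) (vis : List (List Bool)) (r c : Int),
      MRel g vis V → ((allCells g) \ V).card < fuel →
      (dfsA g r c vis fuel).1 = dnum g (compD g V (r, c)) ∧
        MRel g (dfsA g r c vis fuel).2 (V ∪ compD g V (r, c)) := by
  intro fuel
  induction fuel with
  | zero => intro V vis r c h hcard; omega
  | succ fuel ih =>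
    intro V vis r c h hcard
    by_cases hg : r < 0 ∨ c < 0 ∨ (g.length : Int) ≤ r ∨ ((g.headD []).length : Int) ≤ c
        ∨ pvCell g r c = '#' ∨ pvGet2 vis r c = true
    · have hng := (guardA h r c).1 hg
      have hcompD : compD g V (r, c) = ∅ := by rw [compD, if_neg hng]
      have hunf : dfsA g r c vis (fuel+1) = (0, vis) := by
        simp only [dfsA]
        rw [if_pos hg]
      rw [hunf, hcompD]
      exact ⟨(dnum_empty g).symm, by simpa using h⟩
    · have hokn : okP g (r, c) ∧ (r, c) ∉ V := by
        by_contra hq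
        exact hg ((guardA h r c).2 hq)
      obtain ⟨hok, hnv⟩ := hokn
      have hunf : dfsA g r c vis (fuel+1) =
          (let vis1 := pvSet2 vis r c true
           let d0 : Int := if pvCell g r c = 'D' then 1 else 0
           let r1 := dfsA g (r-1) c vis1 fuel
           let r2 := dfsA g (r+1) c r1.2 fuel
           let r3 := dfsA g r (c-1) r2.2 fuel
           let r4 := dfsA g r (c+1) r3.2 fuel
           (d0 + r1.1 + r2.1 + r3.1 + r4.1, r4.2)) := by
        simp only [dfsA]
        rw [if_neg hg]
      rw [hunf]
      simp only []
      have hmem : (r, c) ∈ allCells g := okP_mem_allCells hok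
      have h1 : MRel g (pvSet2 vis r c true) (insert (r, c) V) := MRel_set2 h hmem
      have hc1 : ((allCells g) \ insert (r, c) V).card < fuel := by
        have := card_sdiff_insert_lt hmem hnv
        omega
      -- the four sequential components
      set V1 := insert (r, c) V with hV1
      set K1 := compD g V1 (r-1, c) with hK1
      set V2 := V1 ∪ K1 with hV2
      set K2 := compD g V2 (r+1, c) with hK2
      set V3 := V2 ∪ K2 with hV3
      set K3 := compD g V3 (r, c-1) with hK3
      set V4 := V3 ∪ K3 with hV4
      set K4 := compD g V4 (r, c+1) with hK4
      have i1 := ih V1 (pvSet2 vis r c true) (r-1) c h1 hc1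
      have hc2 : ((allCells g) \ V2).card < fuel :=
        lt_of_le_of_lt (card_sdiff_mono_sub Finset.subset_union_left) hc1
      have i2 := ih V2 _ (r+1) c i1.2 hc2
      have hc3 : ((allCells g) \ V3).card < fuel :=
        lt_of_le_of_lt (card_sdiff_mono_sub Finset.subset_union_left) hc2
      have i3 := ih V3 _ r (c-1) i2.2 hc3
      have hc4 : ((allCells g) \ V4).card < fuel :=
        lt_of_le_of_lt (card_sdiff_mono_sub Finset.subset_union_left) hc3
      have i4 := ih V4 _ r (c+1) i3.2 hc4
      -- the decomposition of the component at (r,c)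
      have hKfull : compD g V (r, c) = compC g V (r, c) := by rw [compD, if_pos ⟨hok, hnv⟩]
      have hdec : compC g V (r, c)
          = insert (r, c) (K1 ∪ (K2 ∪ (K3 ∪ (K4 ∪ ∅)))) := by
        rw [comp_decomp hok hnv]
        congr 1
      -- disjointness facts
      have hd4 : Disjoint K4 (∅ : Finset (Int × Int)) := Finset.disjoint_empty_right _
      have hd3 : Disjoint K3 (K4 ∪ ∅) := by
        rw [Finset.disjoint_left]
        intro a ha hb
        rcases Finset.mem_union.1 hb with hb | hb
        · exact compD_not_mem hb (Finset.mem_union_right _ ha)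
        · exact absurd hb (Finset.notMem_empty a)
      have hd2 : Disjoint K2 (K3 ∪ (K4 ∪ ∅)) := by
        rw [Finset.disjoint_left]
        intro a ha hb
        rcases Finset.mem_union.1 hb with hb | hb
        · exact compD_not_mem hb (Finset.mem_union_right _ ha)
        · rcases Finset.mem_union.1 hb with hb | hb
          · exact compD_not_mem hb
              (Finset.mem_union_left _ (Finset.mem_union_right _ ha))
          · exact absurd hb (Finset.notMem_empty a)
      have hd1 : Disjoint K1 (K2 ∪ (K3 ∪ (K4 ∪ ∅))) := by
        rw [Finset.disjoint_left]
        intro a ha hb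
        have haV2 : a ∈ V2 := Finset.mem_union_right _ ha
        rcases Finset.mem_union.1 hb with hb | hb
        · exact compD_not_mem hb haV2
        · rcases Finset.mem_union.1 hb with hb | hb
          · exact compD_not_mem hb (Finset.mem_union_left _ haV2)
          · rcases Finset.mem_union.1 hb with hb | hb
            · exact compD_not_mem hb
                (Finset.mem_union_left _ (Finset.mem_union_left _ haV2))
            · exact absurd hb (Finset.notMem_empty a)
      have hpnot : (r, c) ∉ K1 ∪ (K2 ∪ (K3 ∪ (K4 ∪ ∅))) := by
        intro hmem'
        have hpV1 : (r, c) ∈ V1 := Finset.mem_insert_self _ _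
        rcases Finset.mem_union.1 hmem' with hb | hb
        · exact compD_not_mem hb hpV1
        · rcases Finset.mem_union.1 hb with hb | hb
          · exact compD_not_mem hb (Finset.mem_union_left _ hpV1)
          · rcases Finset.mem_union.1 hb with hb | hb
            · exact compD_not_mem hb (Finset.mem_union_left _ (Finset.mem_union_left _ hpV1))
            · rcases Finset.mem_union.1 hb with hb | hb
              · exact compD_not_mem hb (Finset.mem_union_left _
                  (Finset.mem_union_left _ (Finset.mem_union_left _ hpV1)))
              · exact absurd hb (Finset.notMem_empty _)
      constructor
      · rw [hKfull, hdec, dnum_insert hpnot, dnum_union hd1, dnum_union hd2,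
          dnum_union hd3, dnum_union hd4, dnum_empty, i1.1, i2.1, i3.1, i4.1]
        ring
      · have hset : V4 ∪ K4 = V ∪ compD g V (r, c) := by
          rw [hKfull, hdec, hV4, hV3, hV2, hV1]
          ext a
          simp only [Finset.mem_union, Finset.mem_insert, Finset.notMem_empty, or_false]
          tauto
        rw [← hset]
        exact i4.2

-- ---- the characterization of B's stack flood ----

def passB (g : List (List Char)) (V : Finset (Int × Int)) (nb : Int × Int) : Bool :=
  decide (0 ≤ nb.1) && decide (nb.1 < (gR g : Int)) && decide (0 ≤ nb.2)
    && decide (nb.2 < (gC g : Int)) && !(pvCell g nb.1 nb.2 == '#') && !(decide (nb ∈ V))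

theorem passB_iff {g : List (List Char)} {V : Finset (Int × Int)} {nb : Int × Int} :
    passB g V nb = true ↔ okP g nb ∧ nb ∉ V := by
  unfold passB okP
  simp [and_assoc]

noncomputable def Mreach (g : List (List Char)) (V : Finset (Int × Int))
    (st : List (Int × Int)) : Finset (Int × Int) :=
  cfilter (fun q => ∃ x ∈ st, Conn g V x q) (allCells g)

theorem mem_Mreach {g : List (List Char)} {V : Finset (Int × Int)} {st : List (Int × Int)}
    {q : Int × Int} :
    q ∈ Mreach g V st ↔ q ∈ allCells g ∧ ∃ x ∈ st, Conn g V x q := by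
  rw [Mreach]
  exact mem_cfilter

theorem Mreach_nil (g : List (List Char)) (V : Finset (Int × Int)) :
    Mreach g V [] = ∅ := by
  ext a
  simp [mem_Mreach]

theorem nbrs_nodup (p : Int × Int) : (nbrs p).Nodup := by
  simp only [nbrs, List.nodup_cons, List.mem_cons, List.not_mem_nil,
    List.nodup_nil, Prod.ext_iff]
  refine ⟨?_, ?_, ?_, ?_⟩ <;> simp <;> omega

-- the inner neighbour loop of floodB
theorem foldn (g : List (List Char)) :
    ∀ (ns : List (Int × Int)) (st : List (Int × Int)) (vis : List (List Bool))
      (V : Finset (Int × Int)), MRel g vis V → ns.Nodup →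
      (ns.foldl (fun (sv : List (Int × Int) × List (List Bool)) nb =>
          if 0 ≤ nb.1 ∧ nb.1 < (g.length : Int) ∧ 0 ≤ nb.2 ∧ nb.2 < ((g.headD []).length : Int)
              ∧ pvCell g nb.1 nb.2 ≠ '#' ∧ ¬ pvGet2 sv.2 nb.1 nb.2 = true
          then (nb :: sv.1, pvSet2 sv.2 nb.1 nb.2 true) else sv) (st, vis)).1
        = (ns.filter (passB g V)).reverse ++ st ∧
      MRel g (ns.foldl (fun (sv : List (Int × Int) × List (List Bool)) nb =>
          if 0 ≤ nb.1 ∧ nb.1 < (g.length : Int) ∧ 0 ≤ nb.2 ∧ nb.2 < ((g.headD []).length : Int)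
              ∧ pvCell g nb.1 nb.2 ≠ '#' ∧ ¬ pvGet2 sv.2 nb.1 nb.2 = true
          then (nb :: sv.1, pvSet2 sv.2 nb.1 nb.2 true) else sv) (st, vis)).2
        (V ∪ (ns.filter (passB g V)).toFinset) := by
  intro ns
  induction ns with
  | nil =>
    intro st vis V h _
    refine ⟨rfl, ?_⟩
    simpa using h
  | cons nb ns ih =>
    intro st vis V h hnd
    rw [List.nodup_cons] at hnd
    have hguard : (0 ≤ nb.1 ∧ nb.1 < (g.length : Int) ∧ 0 ≤ nb.2 ∧ nb.2 < ((g.headD []).length : Int)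
        ∧ pvCell g nb.1 nb.2 ≠ '#' ∧ ¬ pvGet2 vis nb.1 nb.2 = true)
        ↔ (okP g nb ∧ nb ∉ V) := by
      unfold okP gR gC
      constructor
      · rintro ⟨h1, h2, h3, h4, h5, h6⟩
        refine ⟨⟨h1, h2, h3, h4, h5⟩, fun hm => h6 ?_⟩
        exact (h.2.2.2 nb (okP_mem_allCells ⟨h1, h2, h3, h4, h5⟩)).2 hm
      · rintro ⟨⟨h1, h2, h3, h4, h5⟩, h6⟩
        refine ⟨h1, h2, h3, h4, h5, fun hm => h6 ?_⟩
        exact (h.2.2.2 nb (okP_mem_allCells ⟨h1, h2, h3, h4, h5⟩)).1 hm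
    by_cases hp : okP g nb ∧ nb ∉ V
    · have hpass : passB g V nb = true := passB_iff.2 hp
      have hmem : nb ∈ allCells g := okP_mem_allCells hp.1
      have h1 : MRel g (pvSet2 vis nb.1 nb.2 true) (insert nb V) := MRel_set2 h hmem
      have hfc : ns.filter (passB g (insert nb V)) = ns.filter (passB g V) := by
        apply List.filter_congr
        intro x hx
        have hxne : x ≠ nb := fun he => hnd.1 (he ▸ hx)
        by_cases hxp : passB g V x = true
        · obtain ⟨ho, hn⟩ := passB_iff.1 hxp
          rw [hxp, passB_iff.2 ⟨ho, by simp [Finset.mem_insert, hxne, hn]⟩]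
        · have hxp2 : passB g (insert nb V) x = false := by
            rw [Bool.eq_false_iff]
            intro hc
            obtain ⟨ho, hn⟩ := passB_iff.1 hc
            exact hxp (passB_iff.2 ⟨ho, fun hm => hn (Finset.mem_insert_of_mem hm)⟩)
          rw [hxp2, Bool.eq_false_iff.2 hxp]
      have := ih (nb :: st) (pvSet2 vis nb.1 nb.2 true) (insert nb V) h1 hnd.2
      simp only [List.foldl_cons, if_pos (hguard.2 hp)]
      rw [List.filter_cons_of_pos hpass]
      constructor
      · rw [this.1, hfc]
        simp
      · have h2 := this.2
        rw [hfc] at h2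
        have hset : insert nb V ∪ (ns.filter (passB g V)).toFinset
            = V ∪ (nb :: ns.filter (passB g V)).toFinset := by
          ext a
          simp only [Finset.mem_union, Finset.mem_insert, List.toFinset_cons, List.mem_toFinset]
          tauto
        rwa [hset] at h2
    · have hpass : ¬ passB g V nb = true := fun hc => hp (passB_iff.1 hc)
      simp only [List.foldl_cons, if_neg (fun hc => hp (hguard.1 hc))]
      rw [List.filter_cons_of_neg hpass]
      exact ih st vis V h hnd.2

theorem Mreach_step {g : List (List Char)} {V : Finset (Int × Int)} {x : Int × Int}
    {rest : List (Int × Int)} (hxok : okP g x) (hxV : x ∈ V) (hrest : ∀ z ∈ rest, z ∈ V)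
    (hxrest : x ∉ rest) :
    Mreach g V (x :: rest)
      = insert x (Mreach g (V ∪ ((nbrs x).filter (passB g V)).toFinset)
          (((nbrs x).filter (passB g V)).reverse ++ rest)) ∧
    x ∉ Mreach g (V ∪ ((nbrs x).filter (passB g V)).toFinset)
          (((nbrs x).filter (passB g V)).reverse ++ rest) := by
  set N := (nbrs x).filter (passB g V) with hN
  set NF := N.toFinset with hNF
  have hmemN : ∀ z, z ∈ N ↔ z ∈ nbrs x ∧ okP g z ∧ z ∉ V := by
    intro z
    rw [hN, List.mem_filter, passB_iff]
  have hmemst' : ∀ z, z ∈ N.reverse ++ rest ↔ z ∈ N ∨ z ∈ rest := by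
    intro z
    rw [List.mem_append, List.mem_reverse]
  have hxnot : x ∉ Mreach g (V ∪ NF) (N.reverse ++ rest) := by
    intro hx
    obtain ⟨_, z, hz, hc⟩ := mem_Mreach.1 hx
    rcases conn_last_not_mem hc with h1 | h1
    · rcases (hmemst' z).1 hz with hz | hz
      · exact ((hmemN z).1 hz).2.2 (h1 ▸ hxV)
      · exact hxrest (h1 ▸ hz)
    · exact h1 (Finset.mem_union_left _ hxV)
  refine ⟨?_, hxnot⟩
  ext q
  rw [mem_Mreach, Finset.mem_insert, mem_Mreach]
  constructor
  · rintro ⟨hqa, z, hz, hc⟩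
    rcases connW (N := NF) hc with ⟨y, hy, hc'⟩ | hc'
    · refine Or.inr ⟨hqa, y, (hmemst' y).2 (Or.inl (List.mem_toFinset.1 hy)), hc'⟩
    · rcases List.mem_cons.1 hz with rfl | hz
      · rcases Relation.ReflTransGen.cases_head hc' with h1 | ⟨b, hb, _⟩
        · exact Or.inl h1.symm
        · exfalso
          have hbN : b ∈ N := (hmemN b).2 ⟨adj_mem_nbrs hb.1, hb.1.2.1,
            fun hm => hb.2 (Finset.mem_union_left _ hm)⟩
          exact hb.2 (Finset.mem_union_right _ (List.mem_toFinset.2 hbN))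
      · exact Or.inr ⟨hqa, z, (hmemst' z).2 (Or.inr hz), hc'⟩
  · rintro (hqx | ⟨hqa, z, hz, hc⟩)
    · rw [hqx]
      exact ⟨okP_mem_allCells hxok, x, List.mem_cons_self, Relation.ReflTransGen.refl⟩
    · have hc0 : Conn g V z q := conn_mono Finset.subset_union_left hc
      rcases (hmemst' z).1 hz with hzN | hzr
      · obtain ⟨hznb, hzok, hznv⟩ := (hmemN z).1 hzN
        refine ⟨hqa, x, List.mem_cons_self, Relation.ReflTransGen.head ?_ hc0⟩
        exact ⟨nbrs_adj hxok hzok hznb, hznv⟩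
      · exact ⟨hqa, z, List.mem_cons_of_mem _ hzr, hc0⟩

theorem main_B (g : List (List Char)) :
    ∀ (fuel : Nat) (st : List (Int × Int)) (vis : List (List Bool))
      (V : Finset (Int × Int)) (dia emp : Int),
      MRel g vis V → (∀ x ∈ st, okP g x ∧ x ∈ V) → st.Nodup →
      ((allCells g) \ V).card + st.length < fuel →
      (floodB g st vis dia emp fuel).1 = dia + dnum g (Mreach g V st) ∧
      (floodB g st vis dia emp fuel).2.1 = emp + enum g (Mreach g V st) ∧
      MRel g (floodB g st vis dia emp fuel).2.2 (V ∪ Mreach g V st) := by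
  intro fuel
  induction fuel with
  | zero => intro st vis V dia emp _ _ _ hcard; omega
  | succ fuel ih =>
    rintro (_ | ⟨x, rest⟩) vis V dia emp h hst hnd hcard
    · rw [show floodB g [] vis dia emp (fuel+1) = (dia, emp, vis) from rfl, Mreach_nil,
        dnum_empty, enum_empty]
      exact ⟨by ring, by ring, by simpa using h⟩
    · rw [List.nodup_cons] at hnd
      obtain ⟨hxok, hxV⟩ := hst x List.mem_cons_self
      set N := (nbrs x).filter (passB g V) with hN
      set NF := N.toFinset with hNF
      set V' := V ∪ NF with hV'
      set st' := N.reverse ++ rest with hst'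
      have hfold := foldn g (nbrs x) rest vis V h (nbrs_nodup x)
      have hstep := Mreach_step hxok hxV (fun z hz => (hst z (List.mem_cons_of_mem _ hz)).2) hnd.1
      -- one unfolding of the loop
      have hunf : floodB g (x :: rest) vis dia emp (fuel+1) =
          floodB g ((nbrs x).foldl (fun (sv : List (Int × Int) × List (List Bool)) nb =>
            if 0 ≤ nb.1 ∧ nb.1 < (g.length : Int) ∧ 0 ≤ nb.2 ∧ nb.2 < ((g.headD []).length : Int)
                ∧ pvCell g nb.1 nb.2 ≠ '#' ∧ ¬ pvGet2 sv.2 nb.1 nb.2 = true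
            then (nb :: sv.1, pvSet2 sv.2 nb.1 nb.2 true) else sv) (rest, vis)).1
            ((nbrs x).foldl (fun (sv : List (Int × Int) × List (List Bool)) nb =>
            if 0 ≤ nb.1 ∧ nb.1 < (g.length : Int) ∧ 0 ≤ nb.2 ∧ nb.2 < ((g.headD []).length : Int)
                ∧ pvCell g nb.1 nb.2 ≠ '#' ∧ ¬ pvGet2 sv.2 nb.1 nb.2 = true
            then (nb :: sv.1, pvSet2 sv.2 nb.1 nb.2 true) else sv) (rest, vis)).2
            (if pvCell g x.1 x.2 = 'D' then dia + 1 else dia)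
            (if pvCell g x.1 x.2 = 'D' then emp
              else if pvCell g x.1 x.2 = '.' then emp + 1 else emp) fuel := rfl
      rw [hunf, hfold.1]
      have hmrel' : MRel g ((nbrs x).foldl (fun (sv : List (Int × Int) × List (List Bool)) nb =>
            if 0 ≤ nb.1 ∧ nb.1 < (g.length : Int) ∧ 0 ≤ nb.2 ∧ nb.2 < ((g.headD []).length : Int)
                ∧ pvCell g nb.1 nb.2 ≠ '#' ∧ ¬ pvGet2 sv.2 nb.1 nb.2 = true
            then (nb :: sv.1, pvSet2 sv.2 nb.1 nb.2 true) else sv) (rest, vis)).2 V' := hfold.2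
      have hmemN : ∀ z, z ∈ N ↔ z ∈ nbrs x ∧ okP g z ∧ z ∉ V := by
        intro z
        rw [hN, List.mem_filter, passB_iff]
      have hNnd : N.Nodup := (nbrs_nodup x).filter _
      -- fuel arithmetic
      have hNsub : NF ⊆ (allCells g) \ V := by
        intro z hz
        obtain ⟨_, hzok, hznv⟩ := (hmemN z).1 (List.mem_toFinset.1 hz)
        exact Finset.mem_sdiff.2 ⟨okP_mem_allCells hzok, hznv⟩
      have hcNF : ((allCells g) \ V').card + NF.card = ((allCells g) \ V).card := by
        have : (allCells g) \ V' = ((allCells g) \ V) \ NF := by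
          ext a
          simp only [Finset.mem_sdiff, Finset.mem_union, hV']
          tauto
        rw [this]
        exact Finset.card_sdiff_add_card_eq_card hNsub
      have hNFcard : NF.card = N.length := List.toFinset_card_of_nodup hNnd
      have hfuel' : ((allCells g) \ V').card + st'.length < fuel := by
        have hlen : st'.length = N.length + rest.length := by
          rw [hst', List.length_append, List.length_reverse]
        simp only [List.length_cons] at hcard
        omega
      -- hypotheses for the recursive call
      have hst'h : ∀ z ∈ st', okP g z ∧ z ∈ V' := by
        intro z hz
        rcases List.mem_append.1 hz with hz | hz
        · rw [List.mem_reverse] at hz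
          obtain ⟨_, hzok, _⟩ := (hmemN z).1 hz
          exact ⟨hzok, Finset.mem_union_right _ (List.mem_toFinset.2 hz)⟩
        · obtain ⟨hzok, hzV⟩ := hst z (List.mem_cons_of_mem _ hz)
          exact ⟨hzok, Finset.mem_union_left _ hzV⟩
      have hnd' : st'.Nodup := by
        rw [hst', List.nodup_append]
        refine ⟨List.nodup_reverse.2 hNnd, hnd.2, ?_⟩
        intro z hz w hw hzw
        rw [List.mem_reverse] at hz
        subst hzw
        exact ((hmemN z).1 hz).2.2 (hst z (List.mem_cons_of_mem _ hw)).2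
      have hih := ih st' _ V' (if pvCell g x.1 x.2 = 'D' then dia + 1 else dia)
        (if pvCell g x.1 x.2 = 'D' then emp
          else if pvCell g x.1 x.2 = '.' then emp + 1 else emp) hmrel' hst'h hnd' hfuel'
      have hxnot := hstep.2
      have hMeq := hstep.1
      have hdx : dnum g (Mreach g V (x :: rest))
          = (if pvCell g x.1 x.2 = 'D' then 1 else 0) + dnum g (Mreach g V' st') := by
        rw [hMeq, dnum_insert hxnot]
      have hex : enum g (Mreach g V (x :: rest))
          = (if pvCell g x.1 x.2 = '.' then 1 else 0) + enum g (Mreach g V' st') := by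
        rw [hMeq, enum_insert hxnot]
      have hVM : V' ∪ Mreach g V' st' = V ∪ Mreach g V (x :: rest) := by
        have hNFsub : ∀ a ∈ NF, a ∈ Mreach g V' st' := by
          intro a ha
          obtain ⟨_, haok, _⟩ := (hmemN a).1 (List.mem_toFinset.1 ha)
          exact mem_Mreach.2 ⟨okP_mem_allCells haok,
            a, List.mem_append.2 (Or.inl (List.mem_reverse.2 (List.mem_toFinset.1 ha))),
            Relation.ReflTransGen.refl⟩
        rw [hMeq]
        ext a
        simp only [Finset.mem_union, Finset.mem_insert, hV']
        constructor
        · rintro ((ha | ha) | ha)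
          · exact Or.inl ha
          · exact Or.inr (Or.inr (hNFsub a ha))
          · exact Or.inr (Or.inr ha)
        · rintro (ha | (rfl | ha))
          · exact Or.inl (Or.inl ha)
          · exact Or.inl (Or.inl hxV)
          · exact Or.inr ha
      refine ⟨?_, ?_, ?_⟩
      · rw [hih.1, hdx]
        split_ifs <;> ring
      · rw [hih.2.1, hex]
        by_cases hD : pvCell g x.1 x.2 = 'D'
        · rw [if_pos hD, if_neg (show ¬pvCell g x.1 x.2 = '.' by rw [hD]; decide)]
          ring
        · rw [if_neg hD]
          split_ifs <;> ring
      · rw [← hVM]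
        exact hih.2.2

-- ---- outer loops ----

def cellList (g : List (List Char)) : List (Int × Int) :=
  (List.range (gR g)).flatMap (fun (r : Nat) =>
    (List.range (gC g)).map (fun (c : Nat) => ((r : Int), (c : Int))))

theorem mem_cellList {g : List (List Char)} {p : Int × Int} :
    p ∈ cellList g ↔ p ∈ allCells g := by
  rw [mem_allCells, cellList, List.mem_flatMap]
  constructor
  · rintro ⟨r, hr, hm⟩
    rw [List.mem_map] at hm
    obtain ⟨c, hc, rfl⟩ := hm
    rw [List.mem_range] at hr hc
    refine ⟨Int.natCast_nonneg r, ?_, Int.natCast_nonneg c, ?_⟩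
    · show (r : Int) < (gR g : Int)
      exact_mod_cast hr
    · show (c : Int) < (gC g : Int)
      exact_mod_cast hc
  · rintro ⟨h1, h2, h3, h4⟩
    refine ⟨p.1.toNat, by rw [List.mem_range]; omega, ?_⟩
    rw [List.mem_map]
    refine ⟨p.2.toNat, by rw [List.mem_range]; omega, ?_⟩
    obtain ⟨a, b⟩ := p
    simp only [Prod.ext_iff]
    constructor <;> simp <;> omega

theorem foldl_flatMap' {α β γ : Type} (xs : List α) (gf : α → List β) (f : γ → β → γ)
    (init : γ) : (xs.flatMap gf).foldl f init = xs.foldl (fun b x => (gf x).foldl f b) init := by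
  induction xs generalizing init with
  | nil => rfl
  | cons x xs ih =>
    rw [List.flatMap_cons, List.foldl_append, List.foldl_cons, ih]

theorem fresh_eq (g : List (List Char)) :
    (List.range (gR g)).foldl (fun acc _ => acc ++ [List.replicate (gC g) false]) []
      = List.replicate (gR g) (List.replicate (gC g) false) := by
  rw [PySem.List.foldl_append_singleton_eq_map]
  simp [List.map_const']

theorem max_ite_int (b d : Int) : (if b < d then d else b) = max b d := by
  split_ifs with h
  · exact (max_eq_right h.le).symm
  · exact (max_eq_left (by omega)).symm

noncomputable def dotSup (g : List (List Char)) (S : Finset (Int × Int)) : Nat :=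
  (cfilter (fun q => pvCell g q.1 q.2 = '.') S).sup (dvalN g)

noncomputable def listSup (g : List (List Char)) (L : List (Int × Int)) : Nat :=
  L.foldr (fun p a => if pvCell g p.1 p.2 = '.' then dvalN g p ⊔ a else a) 0

theorem cfilter_insert_pos {α : Type} [DecidableEq α] {p : α → Prop} {a : α} {s : Finset α}
    (h : p a) : cfilter p (insert a s) = insert a (cfilter p s) := by
  ext x
  simp only [mem_cfilter, Finset.mem_insert]
  constructor
  · rintro ⟨rfl | hx, hpx⟩
    · exact Or.inl rfl
    · exact Or.inr ⟨hx, hpx⟩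
  · rintro (rfl | ⟨hx, hpx⟩)
    · exact ⟨Or.inl rfl, h⟩
    · exact ⟨Or.inr hx, hpx⟩

theorem cfilter_insert_neg {α : Type} [DecidableEq α] {p : α → Prop} {a : α} {s : Finset α}
    (h : ¬ p a) : cfilter p (insert a s) = cfilter p s := by
  ext x
  simp only [mem_cfilter, Finset.mem_insert]
  constructor
  · rintro ⟨rfl | hx, hpx⟩
    · exact absurd hpx h
    · exact ⟨hx, hpx⟩
  · rintro ⟨hx, hpx⟩
    exact ⟨Or.inr hx, hpx⟩

theorem listSup_eq_sup (g : List (List Char)) (L : List (Int × Int)) :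
    listSup g L = dotSup g L.toFinset := by
  induction L with
  | nil =>
    simp [listSup, dotSup, cfilter, List.toFinset_nil]
  | cons p L ih =>
    rw [listSup, List.foldr_cons, List.toFinset_cons, dotSup]
    by_cases hdot : pvCell g p.1 p.2 = '.'
    · rw [if_pos hdot, cfilter_insert_pos (p := fun q : Int × Int => pvCell g q.1 q.2 = '.') hdot, Finset.sup_insert]
      rw [show L.foldr (fun p a => if pvCell g p.1 p.2 = '.' then dvalN g p ⊔ a else a) 0
        = listSup g L from rfl, ih, dotSup]
    · rw [if_neg hdot, cfilter_insert_neg (p := fun q : Int × Int => pvCell g q.1 q.2 = '.') hdot]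
      rw [show L.foldr (fun p a => if pvCell g p.1 p.2 = '.' then dvalN g p ⊔ a else a) 0
        = listSup g L from rfl, ih, dotSup]

-- A's outer loop over an arbitrary list of in-range cells
theorem outA (g : List (List Char)) :
    ∀ (L : List (Int × Int)), (∀ p ∈ L, p ∈ allCells g) → ∀ (b : Nat),
      L.foldl (fun best p =>
        if pvCell g p.1 p.2 = '.' then
          let d := (dfsA g p.1 p.2 (List.replicate (gR g) (List.replicate (gC g) false))
            (gR g * gC g + 1)).1
          if best < d then d else best
        else best) (b : Int)
      = ((b ⊔ listSup g L : Nat) : Int) := by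
  intro L
  induction L with
  | nil =>
    intro _ b
    simp [listSup]
  | cons p L ih =>
    intro hL b
    rw [List.foldl_cons]
    simp only []
    have hlsup : listSup g (p :: L)
        = if pvCell g p.1 p.2 = '.' then dvalN g p ⊔ listSup g L else listSup g L := rfl
    by_cases hdot : pvCell g p.1 p.2 = '.'
    · have hp := hL p List.mem_cons_self
      obtain ⟨h1, h2, h3, h4⟩ := mem_allCells.1 hp
      have hok : okP g p := ⟨h1, h2, h3, h4, by rw [hdot]; decide⟩
      have hA := main_A g (gR g * gC g + 1) ∅
        (List.replicate (gR g) (List.replicate (gC g) false)) p.1 p.2 (MRel_fresh g)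
        (by rw [Finset.sdiff_empty, card_allCells]; omega)
      have hcomp : compD g ∅ (p.1, p.2) = compC g ∅ p := by
        rw [compD, if_pos ⟨by simpa using hok, by simp⟩]
      have hdval : (dfsA g p.1 p.2 (List.replicate (gR g) (List.replicate (gC g) false))
          (gR g * gC g + 1)).1 = ((dvalN g p : Nat) : Int) := by
        rw [hA.1, hcomp]
        rfl
      rw [if_pos hdot, hdval, max_ite_int, ← Nat.cast_max]
      rw [ih (fun q hq => hL q (List.mem_cons_of_mem _ hq)) (b ⊔ dvalN g p)]
      rw [hlsup, if_pos hdot, sup_assoc]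
    · rw [if_neg hdot, ih (fun q hq => hL q (List.mem_cons_of_mem _ hq)) b]
      rw [hlsup, if_neg hdot]

-- ---- B's outer loop ----

theorem closed_reach {g : List (List Char)} {V : Finset (Int × Int)} (hV : OkClosed g V)
    {p q : Int × Int} (hp : p ∈ V) (h : Conn g ∅ p q) : q ∈ V := by
  induction h with
  | refl => exact hp
  | tail _ st ih => exact (hV _ ih).2 _ st.1

theorem compC_closed_eq {g : List (List Char)} {V : Finset (Int × Int)} (hV : OkClosed g V)
    {p : Int × Int} (hp : p ∉ V) : compC g V p = compC g ∅ p := by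
  ext q
  rw [mem_compC, mem_compC]
  constructor
  · rintro ⟨hok, hc⟩
    exact ⟨hok, conn_mono (Finset.empty_subset _) hc⟩
  · rintro ⟨hok, hc⟩
    exact ⟨hok, closed_irrel hV hp hc⟩

theorem okclosed_union_comp {g : List (List Char)} {V : Finset (Int × Int)}
    (hV : OkClosed g V) (p : Int × Int) : OkClosed g (V ∪ compC g ∅ p) := by
  intro a ha
  rcases Finset.mem_union.1 ha with ha | ha
  · exact ⟨(hV a ha).1, fun b hb => Finset.mem_union_left _ ((hV a ha).2 b hb)⟩
  · obtain ⟨hok, hc⟩ := mem_compC.1 ha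
    exact ⟨conn_ok hok hc, fun b hb => Finset.mem_union_right _ (compC_closed_empty ha hb)⟩

theorem Mreach_single {g : List (List Char)} {V : Finset (Int × Int)} {p : Int × Int}
    (hok : okP g p) : Mreach g V [p] = compC g V p := by
  ext q
  rw [mem_Mreach, mem_compC]
  constructor
  · rintro ⟨_, x, hx, hc⟩
    rcases List.mem_singleton.1 hx with rfl
    exact ⟨hok, hc⟩
  · rintro ⟨_, hc⟩
    exact ⟨okP_mem_allCells (conn_ok hok hc), p, List.mem_singleton.2 rfl, hc⟩

noncomputable def VfinL (g : List (List Char)) (V : Finset (Int × Int))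
    (L : List (Int × Int)) : Finset (Int × Int) :=
  V ∪ cfilter (fun q => ∃ p ∈ L, okP g p ∧ Conn g ∅ p q) (allCells g)

theorem enum_pos_iff {g : List (List Char)} {K : Finset (Int × Int)} :
    0 < enum g K ↔ (cfilter (fun q => pvCell g q.1 q.2 = '.') K).Nonempty := by
  rw [enum, ← Finset.card_pos]
  exact_mod_cast Iff.rfl

theorem outB (g : List (List Char)) :
    ∀ (L : List (Int × Int)), (∀ p ∈ L, p ∈ allCells g) →
      ∀ (vis : List (List Bool)) (V : Finset (Int × Int)) (b : Nat),
      MRel g vis V → OkClosed g V → b = dotSup g V →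
      (L.foldl (fun (st : List (List Bool) × Int) p =>
        if pvCell g p.1 p.2 = '#' ∨ pvGet2 st.1 p.1 p.2 = true then st
        else
          let seen := pvSet2 st.1 p.1 p.2 true
          let f := floodB g [p] seen 0 0 (gR g * gC g + 1)
          if 0 < f.2.1 ∧ st.2 < f.1 then (f.2.2, f.1) else (f.2.2, st.2)) (vis, (b : Int))).2
        = ((dotSup g (VfinL g V L) : Nat) : Int) := by
  intro L
  induction L with
  | nil =>
    intro _ vis V b _ _ hb
    have hVnil : VfinL g V [] = V := by
      ext q
      simp [VfinL, mem_cfilter]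
    rw [hVnil, List.foldl_nil, ← hb]
  | cons p L ih =>
    intro hL vis V b h hcl hb
    have hp := hL p List.mem_cons_self
    rw [List.foldl_cons]
    simp only []
    by_cases hguard : pvCell g p.1 p.2 = '#' ∨ pvGet2 vis p.1 p.2 = true
    · rw [if_pos hguard]
      have hVeq : VfinL g V (p :: L) = VfinL g V L := by
        ext q
        simp only [VfinL, Finset.mem_union, mem_cfilter, List.mem_cons]
        constructor
        · rintro (hq | ⟨hqa, x, hx, hox, hcx⟩)
          · exact Or.inl hq
          · rcases hx with rfl | hx
            · rcases hguard with hguard | hguard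
              · exact absurd hguard hox.2.2.2.2
              · have hxv : x ∈ V := (h.2.2.2 x hp).1 hguard
                exact Or.inl (closed_reach hcl hxv hcx)
            · exact Or.inr ⟨hqa, x, hx, hox, hcx⟩
        · rintro (hq | ⟨hqa, x, hx, hox, hcx⟩)
          · exact Or.inl hq
          · exact Or.inr ⟨hqa, x, Or.inr hx, hox, hcx⟩
      rw [hVeq]
      exact ih (fun q hq => hL q (List.mem_cons_of_mem _ hq)) vis V b h hcl hb
    · rw [if_neg hguard]
      rw [not_or] at hguard
      obtain ⟨hnh, hng⟩ := hguard
      obtain ⟨h1, h2, h3, h4⟩ := mem_allCells.1 hp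
      have hok : okP g p := ⟨h1, h2, h3, h4, hnh⟩
      have hnv : p ∉ V := fun hm => hng ((h.2.2.2 p hp).2 hm)
      have hmr1 : MRel g (pvSet2 vis p.1 p.2 true) (insert p V) := MRel_set2 h hp
      have hfuel : ((allCells g) \ insert p V).card + ([p] : List (Int × Int)).length
          < gR g * gC g + 1 := by
        have hlt := card_sdiff_insert_lt hp hnv
        have hle : ((allCells g) \ V).card ≤ (allCells g).card :=
          Finset.card_le_card Finset.sdiff_subset
        rw [card_allCells] at hle
        simp only [List.length_singleton]
        omega
      have hfl := main_B g (gR g * gC g + 1) [p] (pvSet2 vis p.1 p.2 true) (insert p V) 0 0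
        hmr1 (by
          intro x hx
          rcases List.mem_singleton.1 hx with rfl
          exact ⟨hok, Finset.mem_insert_self _ _⟩) (List.nodup_singleton p) hfuel
      have hM : Mreach g (insert p V) [p] = compC g ∅ p := by
        rw [Mreach_single hok, compC_insert_self, compC_closed_eq hcl hnv]
      set K := compC g ∅ p with hK
      set F := floodB g [p] (pvSet2 vis p.1 p.2 true) 0 0 (gR g * gC g + 1) with hF
      have hv1 : F.1 = ((dvalN g p : Nat) : Int) := by
        rw [hF, hfl.1, hM, zero_add]
        rfl
      have hv2 : F.2.1 = enum g K := by
        rw [hF, hfl.2.1, hM, zero_add]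
      have hins : insert p V ∪ K = V ∪ K := by
        ext q
        simp only [Finset.mem_union, Finset.mem_insert]
        constructor
        · rintro ((rfl | hq) | hq)
          · exact Or.inr (self_mem_compC hok)
          · exact Or.inl hq
          · exact Or.inr hq
        · rintro (hq | hq)
          · exact Or.inl (Or.inr hq)
          · exact Or.inr hq
      have hmr2 : MRel g F.2.2 (V ∪ K) := by
        rw [← hins]
        rw [hF]
        have := hfl.2.2
        rwa [hM] at this
      have hcl2 : OkClosed g (V ∪ K) := okclosed_union_comp hcl p
      -- the new running best
      have hsplit : dotSup g (V ∪ K) = dotSup g V ⊔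
          (cfilter (fun q => pvCell g q.1 q.2 = '.') K).sup (dvalN g) := by
        rw [dotSup, cfilter_union, Finset.sup_union, dotSup]
      have harg : (if 0 < F.2.1 ∧ (b : Int) < F.1 then (F.2.2, F.1) else (F.2.2, (b : Int)))
          = (F.2.2, ((dotSup g (V ∪ K) : Nat) : Int)) := by
        by_cases hne : (cfilter (fun q => pvCell g q.1 q.2 = '.') K).Nonempty
        · have hconst : (cfilter (fun q => pvCell g q.1 q.2 = '.') K).sup (dvalN g)
              = dvalN g p := by
            rw [Finset.sup_congr rfl (g := fun _ => dvalN g p) (fun q hq => by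
              rw [dvalN, dvalN, class_eq (mem_cfilter.1 hq).1])]
            exact Finset.sup_const hne _
          have hpos : 0 < F.2.1 := by
            rw [hv2]
            exact enum_pos_iff.2 hne
          by_cases hlt : (b : Int) < F.1
          · rw [if_pos ⟨hpos, hlt⟩, hsplit, hconst, ← hb]
            have hblt : b < dvalN g p := by
              rw [hv1] at hlt
              exact_mod_cast hlt
            rw [sup_eq_right.2 hblt.le, hv1]
          · rw [if_neg (fun hc => hlt hc.2), hsplit, hconst, ← hb]
            have hble : dvalN g p ≤ b := by
              rw [hv1] at hlt
              exact_mod_cast not_lt.1 hlt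
            rw [sup_eq_left.2 hble]
        · have hempty : cfilter (fun q => pvCell g q.1 q.2 = '.') K = ∅ :=
            Finset.not_nonempty_iff_eq_empty.1 hne
          have hz : F.2.1 = 0 := by
            rw [hv2, enum, hempty]
            simp
          rw [if_neg (fun hc => by rw [hz] at hc; exact absurd hc.1 (by omega)),
            hsplit, hempty, Finset.sup_empty, ← hb]
          rw [sup_bot_eq]
      have hVeq : VfinL g V (p :: L) = VfinL g (V ∪ K) L := by
        ext q
        simp only [VfinL, Finset.mem_union, mem_cfilter, List.mem_cons]
        constructor
        · rintro (hq | ⟨hqa, x, hx, hox, hcx⟩)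
          · exact Or.inl (Or.inl hq)
          · rcases hx with rfl | hx
            · exact Or.inl (Or.inr (mem_compC.2 ⟨hox, hcx⟩))
            · exact Or.inr ⟨hqa, x, hx, hox, hcx⟩
        · rintro ((hq | hq) | ⟨hqa, x, hx, hox, hcx⟩)
          · exact Or.inl hq
          · obtain ⟨hox, hcx⟩ := mem_compC.1 hq
            exact Or.inr ⟨okP_mem_allCells (conn_ok hox hcx), p, Or.inl rfl, hox, hcx⟩
          · exact Or.inr ⟨hqa, x, Or.inr hx, hox, hcx⟩
      rw [harg, hVeq]
      exact ih (fun q hq => hL q (List.mem_cons_of_mem _ hq)) F.2.2 (V ∪ K)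
        (dotSup g (V ∪ K)) hmr2 hcl2 rfl

-- ---- assembling the two ports ----

theorem portA_eq (grid : List String) :
    find_max_diamonds grid
      = ((listSup (grid.map String.toList) (cellList (grid.map String.toList)) : Nat) : Int) := by
  set g := grid.map String.toList with hg
  have e1 : find_max_diamonds grid = (cellList g).foldl (fun best p =>
      if pvCell g p.1 p.2 = '.' then
        let visited := (List.range (gR g)).foldl
          (fun acc _ => acc ++ [List.replicate (gC g) false]) []
        let d := (dfsA g p.1 p.2 visited (gR g * gC g + 1)).1
        if best < d then d else best
      else best) 0 := by
    rw [cellList, foldl_flatMap']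
    simp only [List.foldl_map]
    rfl
  rw [e1, PySem.List.foldl_congr_mem (cellList g) (fun best p =>
      if pvCell g p.1 p.2 = '.' then
        let visited := (List.range (gR g)).foldl
          (fun acc _ => acc ++ [List.replicate (gC g) false]) []
        let d := (dfsA g p.1 p.2 visited (gR g * gC g + 1)).1
        if best < d then d else best
      else best) (fun best p =>
      if pvCell g p.1 p.2 = '.' then
        let d := (dfsA g p.1 p.2 (List.replicate (gR g) (List.replicate (gC g) false))
          (gR g * gC g + 1)).1
        if best < d then d else best
      else best) 0 (fun acc x _ => by rw [fresh_eq g])]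
  rw [show (0 : Int) = ((0 : Nat) : Int) from rfl,
    outA g (cellList g) (fun p hp => mem_cellList.1 hp) 0]
  simp

theorem portB_eq (grid : List String) :
    find_max_diamonds_alt grid
      = ((dotSup (grid.map String.toList)
          (VfinL (grid.map String.toList) ∅ (cellList (grid.map String.toList))) : Nat) : Int) := by
  set g := grid.map String.toList with hg
  have e1 : find_max_diamonds_alt grid = ((cellList g).foldl
      (fun (st : List (List Bool) × Int) p =>
        if pvCell g p.1 p.2 = '#' ∨ pvGet2 st.1 p.1 p.2 = true then st
        else
          let seen := pvSet2 st.1 p.1 p.2 true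
          let f := floodB g [p] seen 0 0 (gR g * gC g + 1)
          if 0 < f.2.1 ∧ st.2 < f.1 then (f.2.2, f.1) else (f.2.2, st.2))
      (List.replicate (gR g) (List.replicate (gC g) false), (0 : Int))).2 := by
    rw [cellList, foldl_flatMap']
    simp only [List.foldl_map]
    rfl
  have hOutB := outB g (cellList g) (fun p hp => mem_cellList.1 hp)
      (List.replicate (gR g) (List.replicate (gC g) false)) ∅ 0 (MRel_fresh g)
      (fun a ha => absurd ha (Finset.notMem_empty a)) (by
        rw [dotSup, show cfilter (fun q => pvCell g q.1 q.2 = '.') (∅ : Finset (Int × Int))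
          = ∅ from by ext a; simp [mem_cfilter]]
        simp)
  rw [Nat.cast_zero] at hOutB
  rw [e1, hOutB]

theorem sup_eq_final (g : List (List Char)) :
    listSup g (cellList g) = dotSup g (VfinL g ∅ (cellList g)) := by
  have h1 : (cellList g).toFinset = allCells g := by
    ext q
    rw [List.mem_toFinset, mem_cellList]
  have h2 : VfinL g ∅ (cellList g) = cfilter (fun q => okP g q) (allCells g) := by
    ext q
    simp only [VfinL, Finset.mem_union, Finset.notMem_empty, false_or, mem_cfilter]
    constructor
    · rintro ⟨hqa, x, hx, hox, hcx⟩
      exact ⟨hqa, conn_ok hox hcx⟩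
    · rintro ⟨hqa, hq⟩
      exact ⟨hqa, q, mem_cellList.2 hqa, hq, Relation.ReflTransGen.refl⟩
  have h3 : cfilter (fun q => pvCell g q.1 q.2 = '.') (cfilter (fun q => okP g q) (allCells g))
      = cfilter (fun q => pvCell g q.1 q.2 = '.') (allCells g) := by
    ext q
    simp only [mem_cfilter]
    constructor
    · rintro ⟨⟨hqa, _⟩, hdot⟩
      exact ⟨hqa, hdot⟩
    · rintro ⟨hqa, hdot⟩
      obtain ⟨hq1, hq2, hq3, hq4⟩ := mem_allCells.1 hqa
      exact ⟨⟨hqa, hq1, hq2, hq3, hq4, by rw [hdot]; decide⟩, hdot⟩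
  rw [listSup_eq_sup, h1, h2]
  rw [show dotSup g (allCells g)
    = (cfilter (fun q => pvCell g q.1 q.2 = '.') (allCells g)).sup (dvalN g) from rfl]
  rw [show dotSup g (cfilter (fun q => okP g q) (allCells g))
    = (cfilter (fun q => pvCell g q.1 q.2 = '.')
        (cfilter (fun q => okP g q) (allCells g))).sup (dvalN g) from rfl]
  rw [h3]

-- ===== VERDICT placeholder =====
theorem find_max_diamonds_spec : Claim_equal_find_max_diamonds := by
  intro grid _ _
  unfold Spec_find_max_diamonds
  rw [portA_eq, portB_eq, sup_eq_final]
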